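-- pv_equiv track=rewrite | github.com/manwar/perlweeklychallenge-club | challenge-109/lubos-kolouch/python/ch-1.py | chowla
-- ===== SOURCE A (Python) =====
-- import math
--
-- def chowla(n):
--     sum = 0
--     for i in range(2, math.isqrt(n) + 1):
--         if n % i == 0:
--             sum += i
--             if i != n//i:
--                 sum += n//i
--     return sum
-- ===== SOURCE B (Python) =====
-- def chowla(n):
--     if n <= 1:
--         return 0
--     sigma = 1
--     m = n
--     p = 2
--     while p * p <= m:
--         if m % p == 0:
--             term = 1
--             pk = 1
--             while m % p == 0:
--                 m //= p
--                 pk *= p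
--                 term += pk
--             sigma *= term
--         p += 1
--     if m > 1:
--         sigma *= m + 1
--     return sigma - n - 1
-- ===== Notes on version B (the rewrite author's own statement) =====
-- stated objective: alternative
-- what changed: Replaces A's divisor-pair enumeration over range(2, isqrt(n)+1) with prime factorization by trial division: strip each prime power p^a from n, multiply the closed-form sigma terms 1+p+...+p^a into a running product, handle a leftover prime factor, and return sigma(n) - n - 1.
import Mathlib
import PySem

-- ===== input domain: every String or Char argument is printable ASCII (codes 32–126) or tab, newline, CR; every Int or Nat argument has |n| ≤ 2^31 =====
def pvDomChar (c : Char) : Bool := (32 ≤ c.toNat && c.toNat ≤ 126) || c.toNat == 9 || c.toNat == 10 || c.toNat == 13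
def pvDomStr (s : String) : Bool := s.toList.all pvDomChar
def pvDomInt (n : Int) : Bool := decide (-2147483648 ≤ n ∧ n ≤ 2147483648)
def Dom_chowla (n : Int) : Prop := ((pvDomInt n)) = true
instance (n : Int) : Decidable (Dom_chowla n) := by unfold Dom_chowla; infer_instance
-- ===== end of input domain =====

-- B replaces A's divisor-pair enumeration up to isqrt(n) with prime factorization by trial
-- division (sigma(n) as a product of closed-form prime-power terms, then sigma - n - 1); same
-- O(sqrt n) bound, a genuinely different algorithm.

-- math.isqrt, exact for n ≥ 0; Python raises ValueError for n < 0 (excluded by Pre_chowla)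
def pyIsqrt (n : Int) : Int := (Nat.sqrt n.toNat : Int)

-- ===== PORT A =====
-- 'sum += i' followed by 'if i != n//i: sum += n//i' is transcribed as the nested if below
def chowla (n : Int) : Int :=
  (PySem.List.pyRange 2 (pyIsqrt n + 1) 1).foldl
    (fun sum i =>
      if PySem.Int.mod n i == 0 then
        if i != PySem.Int.floordiv n i then sum + i + PySem.Int.floordiv n i else sum + i
      else sum) 0

-- ===== PORT B =====
-- inner 'while m % p == 0: m //= p; pk *= p; term += pk' loop; returns (m, pk, term).
-- fuel only makes the recursion structural: with fuel ≥ m iterations it is exactly the loop.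
def chowlaStrip (p m pk term : Int) (fuel : Nat) : Int × Int × Int :=
  match fuel with
  | 0 => (m, pk, term)
  | fuel + 1 =>
    if PySem.Int.mod m p == 0 then
      chowlaStrip p (PySem.Int.floordiv m p) (pk * p) (term + pk * p) fuel
    else (m, pk, term)

-- outer 'while p * p <= m' loop; returns (m, sigma); fuel again only bounds the iterations.
def chowlaLoop (p m sigma : Int) (fuel : Nat) : Int × Int :=
  match fuel with
  | 0 => (m, sigma)
  | fuel + 1 =>
    if p * p ≤ m then
      if PySem.Int.mod m p == 0 then
        let r := chowlaStrip p m 1 1 m.toNat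
        chowlaLoop (p + 1) r.1 (sigma * r.2.2) fuel
      else chowlaLoop (p + 1) m sigma fuel
    else (m, sigma)

def chowla_alt (n : Int) : Int :=
  if n ≤ 1 then 0
  else
    let r := chowlaLoop 2 n 1 n.toNat
    let sigma := if 1 < r.1 then r.2 * (r.1 + 1) else r.2
    sigma - n - 1

-- ===== PRECONDITION & SPEC =====
-- Pre_ admits the nonnegative integers; on negative n A's math.isqrt raises ValueError
def Pre_chowla (n : Int) : Prop := 0 ≤ n
instance (n : Int) : Decidable (Pre_chowla n) := by unfold Pre_chowla; infer_instance
def pvWitness_chowla : Int := 12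

def Spec_chowla (n : Int) (out : Int) : Prop := out = chowla_alt n
instance (n : Int) (out : Int) : Decidable (Spec_chowla n out) := by unfold Spec_chowla; infer_instance

-- ===== CLAIM (what is proved, stated in full; the proofs are below) =====
def Claim_equal_chowla : Prop := ∀ (n : Int), Dom_chowla n → Pre_chowla n → Spec_chowla n (chowla n)

-- ===== LEMMAS AND PROOFS =====

-- σ(N): the sum of all divisors, the common yardstick both ports are measured against.
def pvSigma (N : Nat) : Nat := ∑ d ∈ N.divisors, d

-- ---------- shared arithmetic facts ----------

theorem pvSigma_mul_coprime (m n : Nat) (h : Nat.Coprime m n) :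
    pvSigma (m * n) = pvSigma m * pvSigma n := by
  have h2 := (ArithmeticFunction.isMultiplicative_sigma (k := 1)).map_mul_of_coprime h
  simpa [pvSigma, ArithmeticFunction.sigma_one_apply] using h2

theorem pvSigma_prime (p : Nat) (hp : p.Prime) : pvSigma p = p + 1 := by
  rw [pvSigma, hp.divisors, Finset.sum_pair hp.one_lt.ne]
  omega

-- ---------- half (1): A's loop sums to σ(n) - 1 - n ----------

-- per-element summand of A's loop
def pvG (n i : Int) : Int :=
  if PySem.Int.mod n i == 0 then
    (if i != PySem.Int.floordiv n i then i + PySem.Int.floordiv n i else i) else 0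

theorem chowla_eq_sum_g (n : Int) :
    chowla n = ((PySem.List.pyRange 2 (pyIsqrt n + 1) 1).map (pvG n)).sum := by
  unfold chowla
  have hstep : (fun (sum i : Int) =>
      if PySem.Int.mod n i == 0 then
        if i != PySem.Int.floordiv n i then sum + i + PySem.Int.floordiv n i else sum + i
      else sum) = (fun (sum i : Int) => sum + pvG n i) := by
    funext s i
    unfold pvG
    split_ifs <;> ring
  rw [hstep, PySem.List.foldl_add]
  ring

-- Nat-side summand
def pvGN (N i : Nat) : Nat :=
  if N % i = 0 then (if i ≠ N / i then i + N / i else i) else 0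

theorem pvCast_beq (a b : Nat) : (((a : Nat) : Int) == ((b : Nat) : Int)) = (a == b) := by
  by_cases h : a = b
  · subst h; simp
  · have h1 : ((a : Nat) : Int) ≠ ((b : Nat) : Int) := fun hh => h (by exact_mod_cast hh)
    rw [beq_false_of_ne h1, beq_false_of_ne h]

theorem pvCast_bne (a b : Nat) : (((a : Nat) : Int) != ((b : Nat) : Int)) = (a != b) := by
  simp only [bne, pvCast_beq]

theorem pvG_cast (N i : Nat) : pvG ((N : Nat) : Int) ((i : Nat) : Int) = ((pvGN N i : Nat) : Int) := by
  unfold pvG pvGN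
  rw [PySem.Int.mod_natCast, PySem.Int.floordiv_natCast,
    show ((0 : Int)) = ((0 : Nat) : Int) from rfl, pvCast_beq, pvCast_bne]
  by_cases hm : N % i = 0
  · rw [if_pos (by simp [hm]), if_pos hm]
    by_cases hne : i = N / i
    · rw [if_neg (by rw [← hne]; simp), if_neg (fun hh => hh hne)]
    · rw [if_pos (bne_iff_ne.mpr hne), if_pos hne]
      push_cast
      ring
  · rw [if_neg (by simp [hm]), if_neg hm]

theorem sum_g_nat (n : Int) (hn : 2 ≤ n) :
    ((PySem.List.pyRange 2 (pyIsqrt n + 1) 1).map (pvG n)).sum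
      = ((∑ i ∈ Finset.Icc 2 (Nat.sqrt n.toNat), pvGN n.toNat i : Nat) : Int) := by
  have hN : n = ((n.toNat : Nat) : Int) := by omega
  set N := n.toNat with hNdef
  set R := Nat.sqrt N with hRdef
  have hr : pyIsqrt n = ((R : Nat) : Int) := rfl
  rw [hr, PySem.List.pyRange_one]
  have hcnt : (((R : Nat) : Int) + 1 - 2).toNat = R - 1 := by omega
  rw [hcnt, List.map_map]
  have hfun : (pvG n ∘ fun k : Nat => 2 + (k : Int))
      = fun k : Nat => ((pvGN N (2 + k) : Nat) : Int) := by
    funext k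
    show pvG n (2 + (k : Int)) = _
    have h2 : (2 : Int) + (k : Int) = (((2 + k : Nat)) : Int) := by push_cast; ring
    rw [h2, hN]
    exact pvG_cast N (2 + k)
  rw [hfun]
  have hsum : ((List.range (R - 1)).map (fun k : Nat => ((pvGN N (2 + k) : Nat) : Int))).sum
      = ∑ k ∈ Finset.range (R - 1), ((pvGN N (2 + k) : Nat) : Int) := by
    rfl
  rw [hsum, ← Nat.cast_sum]
  congr 1
  refine Finset.sum_nbij' (fun k => 2 + k) (fun i => i - 2) ?_ ?_ ?_ ?_ ?_
  · intro k hk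
    simp only [Finset.mem_range] at hk
    simp only [Finset.mem_Icc]
    omega
  · intro i hi
    simp only [Finset.mem_Icc] at hi
    simp only [Finset.mem_range]
    omega
  · intro k hk
    show 2 + k - 2 = k
    omega
  · intro i hi
    simp only [Finset.mem_Icc] at hi
    show 2 + (i - 2) = i
    omega
  · intro k hk; rfl

theorem sum_gN_eq (N : Nat) (hN : 2 ≤ N) :
    (∑ i ∈ Finset.Icc 2 N.sqrt, pvGN N i) + 1 + N = pvSigma N := by
  set R := N.sqrt with hRdef
  have hN0 : N ≠ 0 := by omega
  have hR1 : 1 ≤ R := Nat.le_sqrt.mpr (by omega)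
  have hRR : R * R ≤ N := Nat.sqrt_le N
  have hRS : N < (R + 1) * (R + 1) := Nat.lt_succ_sqrt N
  have hRN : R < N := Nat.sqrt_lt_self (by omega)
  -- A: the loop sum as a sum over small divisors
  have hA : (∑ i ∈ Finset.Icc 2 R, pvGN N i)
      = ∑ i ∈ N.divisors.filter (fun i => 2 ≤ i ∧ i ≤ R),
          (i + if i ≠ N / i then N / i else 0) := by
    have h1 : ∀ i ∈ Finset.Icc 2 R, pvGN N i
        = if N % i = 0 then (i + if i ≠ N / i then N / i else 0) else 0 := by
      intro i _
      unfold pvGN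
      split_ifs <;> omega
    rw [Finset.sum_congr rfl h1, ← Finset.sum_filter]
    apply Finset.sum_congr _ (fun _ _ => rfl)
    apply Finset.ext
    intro i
    simp only [Finset.mem_filter, Finset.mem_Icc, Nat.mem_divisors]
    constructor
    · rintro ⟨⟨h2, hR⟩, hm⟩
      exact ⟨⟨Nat.dvd_of_mod_eq_zero hm, hN0⟩, h2, hR⟩
    · rintro ⟨⟨hd, _⟩, h2, hR⟩
      exact ⟨⟨h2, hR⟩, Nat.dvd_iff_mod_eq_zero.mp hd⟩
  -- B: split each summand into the divisor and its (possibly absent) cofactor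
  have hB : ∑ i ∈ N.divisors.filter (fun i => 2 ≤ i ∧ i ≤ R),
        (i + if i ≠ N / i then N / i else 0)
      = (∑ i ∈ N.divisors.filter (fun i => 2 ≤ i ∧ i ≤ R), i)
        + ∑ i ∈ (N.divisors.filter (fun i => 2 ≤ i ∧ i ≤ R)).filter (fun i => i ≠ N / i), N / i := by
    rw [Finset.sum_add_distrib]
    congr 1
    rw [Finset.sum_filter, Finset.sum_filter, Finset.sum_filter]
  -- C: cofactors of the paired small divisors are exactly the large proper divisors
  have hC : ∑ i ∈ (N.divisors.filter (fun i => 2 ≤ i ∧ i ≤ R)).filter (fun i => i ≠ N / i), N / i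
      = ∑ d ∈ N.divisors.filter (fun d => R < d ∧ d < N), d := by
    refine Finset.sum_nbij' (fun i => N / i) (fun d => N / d) ?_ ?_ ?_ ?_ ?_
    · intro a ha
      simp only [Finset.mem_filter, Nat.mem_divisors] at ha
      obtain ⟨⟨⟨hd, _⟩, h2, hR⟩, hne⟩ := ha
      have hdc : N / a ∣ N := ⟨a, (Nat.div_mul_cancel hd).symm⟩
      have hmul : a * (N / a) = N := Nat.mul_div_cancel' hd
      simp only [Finset.mem_filter, Nat.mem_divisors]
      refine ⟨⟨hdc, hN0⟩, ?_, Nat.div_lt_self (by omega) (by omega)⟩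
      by_contra hle
      rw [Nat.not_lt] at hle
      have h1 : N ≤ R * R := by
        calc N = a * (N / a) := hmul.symm
        _ ≤ R * R := Nat.mul_le_mul hR hle
      have haR : a = R := by nlinarith
      have hcR : N / a = R := by nlinarith
      exact hne (haR.trans hcR.symm)
    · intro d hd
      simp only [Finset.mem_filter, Nat.mem_divisors] at hd
      obtain ⟨⟨hdd, _⟩, hRd, hdN⟩ := hd
      have hdc : N / d ∣ N := ⟨d, (Nat.div_mul_cancel hdd).symm⟩
      have hmul : d * (N / d) = N := Nat.mul_div_cancel' hdd
      have h1 : 1 ≤ N / d := (Nat.one_le_div_iff (by omega)).mpr (Nat.le_of_dvd (by omega) hdd)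
      have hne1 : N / d ≠ 1 := by
        intro h
        rw [h] at hmul
        omega
      have hle : N / d ≤ R := by
        have h2 : N / d ≤ N / (R + 1) := Nat.div_le_div_left (by omega) (by omega)
        have h3 : N / (R + 1) < R + 1 := (Nat.div_lt_iff_lt_mul (by omega)).mpr hRS
        omega
      have hdiv : N / (N / d) = d := Nat.div_div_self hdd hN0
      simp only [Finset.mem_filter, Nat.mem_divisors]
      exact ⟨⟨⟨hdc, hN0⟩, by omega, hle⟩, by omega⟩
    · intro a ha
      simp only [Finset.mem_filter, Nat.mem_divisors] at ha
      exact Nat.div_div_self ha.1.1.1 hN0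
    · intro d hd
      simp only [Finset.mem_filter, Nat.mem_divisors] at hd
      exact Nat.div_div_self hd.1.1 hN0
    · intro a _
      rfl
  -- D: split sigma(N) into the small and large divisors, peeling off 1 and N
  have hsplit := Finset.sum_filter_add_sum_filter_not N.divisors (fun d => d ≤ R) (fun d => d)
  have hsmall : N.divisors.filter (fun d => d ≤ R)
      = insert 1 (N.divisors.filter (fun i => 2 ≤ i ∧ i ≤ R)) := by
    apply Finset.ext
    intro i
    simp only [Finset.mem_filter, Finset.mem_insert, Nat.mem_divisors]
    constructor
    · rintro ⟨⟨hd, _⟩, hle⟩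
      have := Nat.pos_of_dvd_of_pos hd (by omega)
      rcases Nat.lt_or_ge i 2 with h | h
      · left; omega
      · right; exact ⟨⟨hd, hN0⟩, h, hle⟩
    · rintro (rfl | ⟨⟨hd, _⟩, h2, hle⟩)
      · exact ⟨⟨one_dvd N, hN0⟩, hR1⟩
      · exact ⟨⟨hd, hN0⟩, hle⟩
  have hlarge : N.divisors.filter (fun d => ¬ d ≤ R)
      = insert N (N.divisors.filter (fun d => R < d ∧ d < N)) := by
    apply Finset.ext
    intro d
    simp only [Finset.mem_filter, Finset.mem_insert, Nat.mem_divisors]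
    constructor
    · rintro ⟨⟨hd, _⟩, hgt⟩
      have := Nat.le_of_dvd (by omega) hd
      rcases Nat.lt_or_ge d N with h | h
      · right; exact ⟨⟨hd, hN0⟩, by omega, h⟩
      · left; omega
    · rintro (h | ⟨⟨hd, _⟩, hgt, _⟩)
      · subst h
        exact ⟨⟨dvd_refl d, hN0⟩, by omega⟩
      · exact ⟨⟨hd, hN0⟩, by omega⟩
  have h1notin : (1 : Nat) ∉ N.divisors.filter (fun i => 2 ≤ i ∧ i ≤ R) := by
    simp
  have hNnotin : N ∉ N.divisors.filter (fun d => R < d ∧ d < N) := by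
    simp
  rw [hA, hB, hC]
  rw [hsmall, hlarge, Finset.sum_insert h1notin, Finset.sum_insert hNnotin] at hsplit
  unfold pvSigma
  omega

-- ---------- half (2): B's factorization product is σ(n) ----------

theorem chowlaStrip_spec (p : Nat) (hp : 2 ≤ p) :
    ∀ (m : Nat), 1 ≤ m → ∀ (fuel : Nat), m ≤ fuel → ∀ (pk term : Int),
      ∃ (a : Nat) (m' : Nat), m = p ^ a * m' ∧ ¬ (p ∣ m') ∧ 1 ≤ m' ∧
        chowlaStrip (p : Int) (m : Int) pk term fuel
          = ((m' : Int), pk * (p : Int) ^ a,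
             term + pk * ((∑ i ∈ Finset.range a, p ^ (i + 1) : Nat) : Int)) := by
  intro m
  induction m using Nat.strong_induction_on with
  | _ m ih =>
    intro hm fuel hfuel pk term
    match fuel with
    | 0 => omega
    | fuel + 1 =>
      by_cases hdvd : p ∣ m
      · have hp0 : 0 < p := by omega
        have hmp : 1 ≤ m / p := (Nat.one_le_div_iff hp0).mpr (Nat.le_of_dvd (by omega) hdvd)
        have hlt : m / p < m := Nat.div_lt_self (by omega) (by omega)
        obtain ⟨a, m', heq, hnd, hm1, hrec⟩ :=
          ih (m / p) hlt hmp fuel (by omega) (pk * (p : Int)) (term + pk * (p : Int))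
        refine ⟨a + 1, m', ?_, hnd, hm1, ?_⟩
        · calc m = m / p * p := (Nat.div_mul_cancel hdvd).symm
          _ = p ^ a * m' * p := by rw [heq]
          _ = p ^ (a + 1) * m' := by ring
        · have hstep : chowlaStrip (p : Int) (m : Int) pk term (fuel + 1)
              = chowlaStrip (p : Int) ((m / p : Nat) : Int) (pk * (p : Int)) (term + pk * (p : Int)) fuel := by
            simp [chowlaStrip, Int.natCast_dvd_natCast, hdvd, PySem.Int.floordiv_natCast]
          rw [hstep, hrec]
          have hS : (∑ i ∈ Finset.range (a + 1), p ^ (i + 1)) = p * (∑ i ∈ Finset.range a, p ^ (i + 1)) + p := by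
            rw [Finset.sum_range_succ' (fun i => p ^ (i + 1)) a, Finset.mul_sum]
            simp [pow_succ, mul_comm]
          rw [hS]
          simp only [Prod.mk.injEq]
          push_cast
          exact ⟨trivial, by ring, by ring⟩
      · have hmod : ¬ ((p : Int) ∣ (m : Int)) := fun h => hdvd (Int.natCast_dvd_natCast.mp h)
        refine ⟨0, m, by simp, hdvd, hm, ?_⟩
        simp [chowlaStrip, hmod]

-- exit state of the outer loop: m has no prime factor below p and p*p > m, so m is 1 or prime
theorem pvLoop_exit (N p m c : Nat) (hNc : N = c * m)
    (hmf : ∀ q : Nat, q.Prime → q ∣ m → p ≤ q) (hcf : ∀ q : Nat, q.Prime → q ∣ c → q < p)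
    (hstop : m < p * p) :
    pvSigma c * pvSigma m = pvSigma N ∧ (1 < m → m.Prime) := by
  have hco : Nat.Coprime c m := by
    by_contra hnc
    obtain ⟨q, hq, hqc, hqm⟩ := Nat.Prime.not_coprime_iff_dvd.mp hnc
    exact absurd (hmf q hq hqm) (by have := hcf q hq hqc; omega)
  refine ⟨by rw [hNc, pvSigma_mul_coprime c m hco], ?_⟩
  intro h1m
  by_contra hnp
  have hsq := Nat.minFac_sq_le_self (by omega) hnp
  have hple := hmf m.minFac (Nat.minFac_prime (by omega)) (Nat.minFac_dvd m)
  have : p * p ≤ m.minFac * m.minFac := Nat.mul_le_mul hple hple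
  have : m.minFac ^ 2 = m.minFac * m.minFac := sq m.minFac
  omega

theorem chowlaLoop_spec (N : Nat) :
    ∀ (fuel : Nat), ∀ (p m : Nat) (c : Nat), 2 ≤ p → 1 ≤ m → N = c * m →
      (∀ q : Nat, q.Prime → q ∣ m → p ≤ q) →
      (∀ q : Nat, q.Prime → q ∣ c → q < p) →
      m + 2 ≤ fuel + p →
      ∃ (mf : Nat) (sf : Nat),
        chowlaLoop (p : Int) (m : Int) ((pvSigma c : Nat) : Int) fuel = ((mf : Int), (sf : Int)) ∧
        sf * pvSigma mf = pvSigma N ∧ 1 ≤ mf ∧ (1 < mf → mf.Prime) := by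
  intro fuel
  induction fuel with
  | zero =>
    intro p m c hp hm hNc hmf hcf hfuel
    refine ⟨m, pvSigma c, rfl, ?_, hm, ?_⟩
    · exact (pvLoop_exit N p m c hNc hmf hcf (by nlinarith)).1
    · exact (pvLoop_exit N p m c hNc hmf hcf (by nlinarith)).2
  | succ fuel ih =>
    intro p m c hp hm hNc hmf hcf hfuel
    by_cases hle : p * p ≤ m
    · by_cases hdv : p ∣ m
      · -- p divides m, so p is prime (m has no factor below p)
        have hP : p.Prime := by
          rw [Nat.prime_def_minFac]
          refine ⟨hp, Nat.le_antisymm (Nat.minFac_le (by omega)) ?_⟩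
          exact hmf p.minFac (Nat.minFac_prime (by omega)) (dvd_trans (Nat.minFac_dvd p) hdv)
        obtain ⟨a, m', heq, hnd, hm1, hrec⟩ := chowlaStrip_spec p hp m hm m le_rfl 1 1
        have hco : Nat.Coprime c (p ^ a) := by
          have hpc : ¬ p ∣ c := fun h => absurd (hcf p hP h) (by omega)
          exact ((hP.coprime_iff_not_dvd.mpr hpc).symm).pow_right a
        have hterm : (1 : Int) + ((∑ i ∈ Finset.range a, p ^ (i + 1) : Nat) : Int)
            = ((pvSigma (p ^ a) : Nat) : Int) := by
          have h1 : pvSigma (p ^ a) = ∑ i ∈ Finset.range (a + 1), p ^ i :=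
            Nat.sum_divisors_prime_pow hP
          have h2 : ∑ i ∈ Finset.range (a + 1), p ^ i
              = ∑ i ∈ Finset.range a, p ^ (i + 1) + 1 := by
            rw [Finset.sum_range_succ' (fun i => p ^ i) a]
            simp
          rw [h1, h2]
          push_cast
          ring
        have hstep : chowlaLoop (p : Int) (m : Int) ((pvSigma c : Nat) : Int) (fuel + 1)
            = chowlaLoop ((p : Int) + 1) ((m' : Nat) : Int)
                (((pvSigma c : Nat) : Int) * ((1 : Int) * ((pvSigma (p ^ a) : Nat) : Int))) fuel := by
          have hleI : ((p : Int) * (p : Int) ≤ (m : Int)) := by exact_mod_cast hle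
          have hmodI : (PySem.Int.mod (m : Int) (p : Int) == 0) = true := by
            rw [PySem.Int.mod_natCast]
            simp [Nat.mod_eq_zero_of_dvd hdv]
          simp only [chowlaLoop, if_pos hleI, hmodI, Int.toNat_natCast]
          rw [hrec]
          simp only [one_mul]
          rw [← hterm]
          simp
        have ha1 : 1 ≤ a := by
          rcases Nat.eq_zero_or_pos a with h0 | h1
          · subst h0; simp at heq; exact absurd (heq ▸ hdv) hnd
          · exact h1
        have hm'le : m' ≤ m := by
          calc m' = 1 * m' := (one_mul m').symm
          _ ≤ p ^ a * m' := Nat.mul_le_mul_right m' (Nat.one_le_pow a p (by omega))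
          _ = m := heq.symm
        obtain ⟨mf, sf, hloop, hsig, hmf1, hmfp⟩ :=
          ih (p + 1) m' (c * p ^ a) (by omega) hm1
            (by rw [hNc, heq]; ring)
            (by
              intro q hq hqm
              have hq1 := hmf q hq (hqm.trans (heq ▸ dvd_mul_left m' (p ^ a)))
              have : q ≠ p := fun h => hnd (h ▸ hqm)
              omega)
            (by
              intro q hq hqc
              rcases (Nat.Prime.dvd_mul hq).mp hqc with h | h
              · have := hcf q hq h; omega
              · have := hq.dvd_of_dvd_pow h
                have := Nat.le_of_dvd (by omega) this
                have := hq.two_le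
                -- q ∣ p and q prime, p prime: q = p
                have hqp : q = p := (Nat.prime_dvd_prime_iff_eq hq hP).mp (hq.dvd_of_dvd_pow h)
                omega)
            (by omega)
        refine ⟨mf, sf, ?_, hsig, hmf1, hmfp⟩
        rw [hstep]
        have hsg : ((pvSigma c : Nat) : Int) * (1 * ((pvSigma (p ^ a) : Nat) : Int))
            = ((pvSigma (c * p ^ a) : Nat) : Int) := by
          rw [pvSigma_mul_coprime c (p ^ a) hco]
          push_cast
          ring
        have hcast : ((p : Int) + 1) = (((p + 1 : Nat)) : Int) := by push_cast; ring
        rw [hsg, hcast]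
        exact hloop
      · have hstep : chowlaLoop (p : Int) (m : Int) ((pvSigma c : Nat) : Int) (fuel + 1)
            = chowlaLoop ((p : Int) + 1) (m : Int) ((pvSigma c : Nat) : Int) fuel := by
          have hleI : ((p : Int) * (p : Int) ≤ (m : Int)) := by exact_mod_cast hle
          have hmodI : (PySem.Int.mod (m : Int) (p : Int) == 0) = false := by
            rw [PySem.Int.mod_natCast]
            have hne : ¬ ((p : Int) ∣ (m : Int)) := fun h => hdv (Int.natCast_dvd_natCast.mp h)
            simpa using hne
          simp only [chowlaLoop, if_pos hleI, hmodI, Bool.false_eq_true, if_false]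
        rw [hstep]
        have hcast : ((p : Int) + 1) = (((p + 1 : Nat)) : Int) := by push_cast; ring
        rw [hcast]
        exact ih (p + 1) m c (by omega) hm hNc
          (by
            intro q hq hqm
            have := hmf q hq hqm
            have : q ≠ p := fun h => hdv (h ▸ hqm)
            omega)
          (by intro q hq hqc; have := hcf q hq hqc; omega)
          (by omega)
    · have hstep : chowlaLoop (p : Int) (m : Int) ((pvSigma c : Nat) : Int) (fuel + 1)
          = ((m : Int), ((pvSigma c : Nat) : Int)) := by
        have hleI : ¬ ((p : Int) * (p : Int) ≤ (m : Int)) := by exact_mod_cast hle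
        simp [chowlaLoop, hleI]
      refine ⟨m, pvSigma c, hstep, ?_, hm, ?_⟩
      · exact (pvLoop_exit N p m c hNc hmf hcf (by omega)).1
      · exact (pvLoop_exit N p m c hNc hmf hcf (by omega)).2

-- ===== VERDICT (by name: the statement is the Claim_ definition above) =====
theorem chowla_spec : Claim_equal_chowla := by
  intro n _ hn
  unfold Pre_chowla at hn
  unfold Spec_chowla
  by_cases h1 : n ≤ 1
  · have : n = 0 ∨ n = 1 := by omega
    rcases this with h | h <;> subst h <;> decide
  · have hN2 : 2 ≤ n.toNat := by omega
    have hNn : n = ((n.toNat : Nat) : Int) := by omega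
    set N := n.toNat with hNdef
    have hs1 : pvSigma 1 = 1 := by decide
    obtain ⟨mf, sf, hloop, hsig, hmf1, hmfp⟩ :=
      chowlaLoop_spec N N 2 N 1 le_rfl (by omega) (one_mul N).symm
        (fun q hq _ => hq.two_le)
        (fun q hq hd => absurd (Nat.dvd_one.mp hd) hq.ne_one)
        (by omega)
    have hA : chowla n = ((∑ i ∈ Finset.Icc 2 N.sqrt, pvGN N i : Nat) : Int) := by
      rw [chowla_eq_sum_g, sum_g_nat n (by omega)]
    have hB : chowla_alt n = ((pvSigma N : Nat) : Int) - n - 1 := by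
      unfold chowla_alt
      rw [if_neg h1]
      have hl2 : chowlaLoop 2 (n : Int) 1 n.toNat
          = chowlaLoop ((2 : Nat) : Int) ((N : Nat) : Int) ((pvSigma 1 : Nat) : Int) N := by
        rw [hs1, ← hNn]
        norm_num
        rw [hNdef]
      rw [hl2, hloop]
      show (if (1 : Int) < ((mf : Nat) : Int)
          then ((sf : Nat) : Int) * (((mf : Nat) : Int) + 1) else ((sf : Nat) : Int)) - n - 1
        = ((pvSigma N : Nat) : Int) - n - 1
      by_cases hm1 : 1 < mf
      · have hmp := hmfp hm1
        have hlt : (1 : Int) < ((mf : Nat) : Int) := by exact_mod_cast hm1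
        rw [if_pos hlt]
        have hv : sf * (mf + 1) = pvSigma N := by
          rw [← pvSigma_prime mf hmp]
          exact hsig
        push_cast [← hv]
        ring
      · have hmf1' : mf = 1 := by omega
        subst hmf1'
        rw [hs1, mul_one] at hsig
        rw [if_neg (by norm_num), hsig]
    rw [hA, hB]
    have hsum := sum_gN_eq N hN2
    have hsum' : ((∑ i ∈ Finset.Icc 2 N.sqrt, pvGN N i : Nat) : Int) + 1 + ((N : Nat) : Int)
        = ((pvSigma N : Nat) : Int) := by exact_mod_cast hsum
    omega
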